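-- pv_equiv track=rewrite | github.com/Pan-tech15/analisis-sentimen | backend/app/services/lexicon_nb.py | build_dictionary_lexicon
-- ===== SOURCE A (Python) =====
-- def build_dictionary_lexicon(texts, labels, classes):
--     lexicon = {c: {} for c in classes}
--     for text, label in zip(texts, labels):
--         words = set(text.split())
--         for w in words:
--             for c in classes:
--                 if c not in lexicon:
--                     lexicon[c] = {}
--                 if w not in lexicon[c]:
--                     lexicon[c][w] = 0
--                 if c == label:
--                     lexicon[c][w] = 1
--     return lexicon
-- ===== SOURCE B (Python) =====
-- def build_dictionary_lexicon(texts, labels, classes):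
--     # Inverted index: each word -> set of labels of the texts containing it.
--     index = {}
--     for text, label in zip(texts, labels):
--         for w in set(text.split()):
--             index.setdefault(w, set()).add(label)
--     # Reshape: one presence-indicator dict per class, over the full vocabulary.
--     return {c: {w: (1 if c in ls else 0) for w, ls in index.items()}
--             for c in classes}
-- ===== Notes on version B (the rewrite author's own statement) =====
-- stated objective: faster
-- what changed: Replaces A's per-word-per-class nested dict updates with an inverted index (word -> set of labels seen with it) built in one pass, then a reshape pass emitting each class's 0/1 indicator dict.
import Mathlib
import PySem

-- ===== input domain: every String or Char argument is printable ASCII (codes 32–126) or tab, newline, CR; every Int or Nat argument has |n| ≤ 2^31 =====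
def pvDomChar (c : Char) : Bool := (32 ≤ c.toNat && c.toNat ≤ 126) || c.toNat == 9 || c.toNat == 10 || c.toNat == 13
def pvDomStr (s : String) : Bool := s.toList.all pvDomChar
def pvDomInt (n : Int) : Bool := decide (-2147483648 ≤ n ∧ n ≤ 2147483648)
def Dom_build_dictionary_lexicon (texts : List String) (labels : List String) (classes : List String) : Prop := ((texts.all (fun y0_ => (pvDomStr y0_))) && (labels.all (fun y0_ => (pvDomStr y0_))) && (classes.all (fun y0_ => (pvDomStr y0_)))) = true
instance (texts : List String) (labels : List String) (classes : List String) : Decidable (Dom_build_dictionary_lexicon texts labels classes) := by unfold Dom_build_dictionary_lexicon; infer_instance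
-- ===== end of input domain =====

-- B replaces A's per-word-per-class nested dict updates by an inverted index (word → label set)
-- plus a reshape pass per class; equal return value, different traversal (objective: faster).

-- ===== PORT A =====
-- the body of A's innermost 'for c in classes' loop (the three guarded dict updates), as a named helper
def pvAClassStep (w l : String) (lex : PySem.Dict String (PySem.Dict String Int)) (c : String) :
    PySem.Dict String (PySem.Dict String Int) :=
  let lex1 := if lex.contains c then lex else lex.insert c (PySem.Dict.mk [])
  let lex2 := if (lex1.getD c (PySem.Dict.mk [])).contains w then lex1
              else lex1.modify c (PySem.Dict.mk []) (fun inner => inner.insert w 0)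
  if c == l then lex2.modify c (PySem.Dict.mk []) (fun inner => inner.insert w 1) else lex2

def build_dictionary_lexicon (texts : List String) (labels : List String) (classes : List String) :
    List (String × List (String × Int)) :=
  let lexicon0 : PySem.Dict String (PySem.Dict String Int) :=
    classes.foldl (fun d c => d.insert c (PySem.Dict.mk [])) (PySem.Dict.mk [])
  let lexicon :=
    (texts.zip labels).foldl (fun lex tl =>
      (PySem.Set.ofList (PySem.Str.split₀ tl.1)).foldl (fun lex w =>
        classes.foldl (pvAClassStep w tl.2) lex) lex) lexicon0
  lexicon.items.map (fun p => (p.1, p.2.items))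

-- ===== PORT B =====
def build_dictionary_lexicon_alt (texts : List String) (labels : List String) (classes : List String) :
    List (String × List (String × Int)) :=
  let index : PySem.Dict String (PySem.Set String) :=
    (texts.zip labels).foldl (fun idx tl =>
      (PySem.Set.ofList (PySem.Str.split₀ tl.1)).foldl (fun idx w =>
        idx.modify w PySem.Set.empty (fun s => s.add tl.2)) idx) (PySem.Dict.mk [])
  let lexicon : PySem.Dict String (PySem.Dict String Int) :=
    classes.foldl (fun d c =>
      d.insert c (index.items.foldl (fun inner p =>
        inner.insert p.1 (if p.2.contains c then (1 : Int) else 0)) (PySem.Dict.mk []))) (PySem.Dict.mk [])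
  lexicon.items.map (fun p => (p.1, p.2.items))

-- ===== PRECONDITION & SPEC =====
def Spec_build_dictionary_lexicon (texts : List String) (labels : List String) (classes : List String) (out : List (String × List (String × Int))) : Prop := out = build_dictionary_lexicon_alt texts labels classes
instance (texts : List String) (labels : List String) (classes : List String) (out : List (String × List (String × Int))) : Decidable (Spec_build_dictionary_lexicon texts labels classes out) := by unfold Spec_build_dictionary_lexicon; infer_instance

-- ===== CLAIM (what is proved, stated in full; the proofs are below) =====
def Claim_equal_build_dictionary_lexicon : Prop := ∀ (texts : List String) (labels : List String) (classes : List String), Dom_build_dictionary_lexicon texts labels classes → Spec_build_dictionary_lexicon texts labels classes (build_dictionary_lexicon texts labels classes)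

-- ===== LEMMAS AND PROOFS =====

-- a dict whose items are s.map (fun x => (x, g x))
def pvMk {V : Type} (s : List String) (g : String → V) : PySem.Dict String V :=
  PySem.Dict.mk (s.map (fun x => (x, g x)))

-- the word/label event stream: one (word, label) pair per distinct word of each zipped text
def pvEvents (texts labels : List String) : List (String × String) :=
  (texts.zip labels).flatMap (fun tl => (PySem.Set.ofList (PySem.Str.split₀ tl.1)).map (fun w => (w, tl.2)))

def pvU (es : List (String × String)) : List String := PySem.Set.ofList (es.map (·.1))

def pvInd (es : List (String × String)) (c w : String) : Int :=
  if es.any (fun e => e.1 == w && e.2 == c) then 1 else 0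

def pvLab (es : List (String × String)) (w : String) : PySem.Set String :=
  PySem.Set.ofList ((es.filter (fun e => e.1 == w)).map (·.2))

-- the effect of one pvAClassStep on the class-c inner dict
def pvStepInner (w l c : String) (i : PySem.Dict String Int) : PySem.Dict String Int :=
  let i1 := if i.contains w then i else i.insert w 0
  if c == l then i1.insert w 1 else i1

theorem pvMk_congr {V : Type} {s : List String} {g h : String → V}
    (hgh : ∀ x ∈ s, g x = h x) : pvMk s g = pvMk s h := by
  unfold pvMk
  exact congrArg PySem.Dict.mk (List.map_congr_left (fun x hx => by rw [hgh x hx]))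

theorem contains_pvMk {V : Type} (s : List String) (g : String → V) (k : String) :
    (pvMk s g).contains k = decide (k ∈ s) := by
  unfold pvMk
  rw [PySem.Dict.contains_mk, Bool.eq_iff_iff]
  constructor
  · intro h
    obtain ⟨p, hp, he⟩ := List.any_eq_true.mp h
    obtain ⟨x, hx, rfl⟩ := List.mem_map.mp hp
    simp_all
  · intro h
    exact List.any_eq_true.mpr ⟨(k, g k), List.mem_map.mpr ⟨k, by simpa using h, rfl⟩, by simp⟩

theorem keys_pvMk {V : Type} (s : List String) (g : String → V) : (pvMk s g).keys = s := by
  unfold pvMk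
  rw [PySem.Dict.keys_mk, List.map_map,
    show ((fun (x : String × V) => x.1) ∘ fun x => (x, g x)) = id from rfl, List.map_id]

theorem getD_pvMk {V : Type} {s : List String} (hs : s.Nodup) {c : String} (hc : c ∈ s)
    (g : String → V) (d0 : V) : (pvMk s g).getD c d0 = g c := by
  apply PySem.Dict.getD_of_mem_items
  · exact List.mem_map.mpr ⟨c, hc, rfl⟩
  · rw [keys_pvMk]; exact hs

theorem getD_pvMk_of_not_mem {V : Type} {s : List String} {c : String} (hc : c ∉ s)
    (g : String → V) (d0 : V) : (pvMk s g).getD c d0 = d0 := by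
  apply PySem.Dict.getD_of_not_contains
  rw [contains_pvMk]; simpa using hc

theorem insert_pvMk_of_mem {V : Type} {s : List String} {c : String} (hc : c ∈ s)
    (g : String → V) (v : V) :
    (pvMk s g).insert c v = pvMk s (fun x => if x = c then v else g x) := by
  apply PySem.Dict.ext
  rw [PySem.Dict.items_insert_of_contains _ v (by rw [contains_pvMk]; simpa using hc)]
  unfold pvMk
  simp only [List.map_map]
  exact List.map_congr_left (fun x _ => by by_cases h : x = c <;> simp [h])

theorem insert_pvMk_of_not_mem {V : Type} {s : List String} {c : String} (hc : c ∉ s)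
    (g : String → V) (v : V) :
    (pvMk s g).insert c v = pvMk (s ++ [c]) (fun x => if x = c then v else g x) := by
  apply PySem.Dict.ext
  rw [PySem.Dict.items_insert_of_not_contains _ v (by rw [contains_pvMk]; simpa using hc)]
  unfold pvMk
  simp only [List.map_append, List.map_cons, List.map_nil]
  congr 1
  exact List.map_congr_left (fun x hx => by
    have : x ≠ c := fun he => hc (he ▸ hx)
    simp [this])

-- a fold of inserts with accumulator-independent values, on a pvMk-shaped dict
theorem foldl_insert_pvMk {V : Type} (cs : List String) (s : List String) (v : String → V) :
    cs.foldl (fun d c => d.insert c (v c)) (pvMk s v) = pvMk (PySem.Set.update s cs) v := by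
  induction cs generalizing s with
  | nil => rfl
  | cons c cs ih =>
    simp only [List.foldl_cons]
    by_cases hc : c ∈ s
    · rw [insert_pvMk_of_mem hc,
        pvMk_congr (h := v) (fun x _ => by by_cases h : x = c <;> simp [h]),
        ih s]
      have : PySem.Set.add s c = s := PySem.Set.add_of_mem hc
      simp [PySem.Set.update, this]
    · rw [insert_pvMk_of_not_mem hc,
        pvMk_congr (h := v) (fun x _ => by by_cases h : x = c <;> simp [h]),
        ih (s ++ [c])]
      have : PySem.Set.add s c = s ++ [c] := PySem.Set.add_of_not_mem hc
      simp [PySem.Set.update, this]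

theorem pvStepInner_idem (w l c : String) (i : PySem.Dict String Int) :
    pvStepInner w l c (pvStepInner w l c i) = pvStepInner w l c i := by
  unfold pvStepInner
  by_cases hw : i.contains w = true <;> by_cases hl : (c == l) = true <;>
    simp [hw, hl, PySem.Dict.insert_insert_self]

-- one pvAClassStep on a class-indexed pvMk dict updates exactly the class-c entry
theorem pvAClassStep_pvMk (w l : String) {C : List String} (hn : C.Nodup) {c : String}
    (hc : c ∈ C) (g : String → PySem.Dict String Int) :
    pvAClassStep w l (pvMk C g) c
      = pvMk C (fun c' => if c' = c then pvStepInner w l c (g c) else g c') := by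
  have hgc : ∀ g' : String → PySem.Dict String Int,
      (pvMk C g').getD c (PySem.Dict.mk []) = g' c := fun g' => getD_pvMk hn hc g' _
  have hcont : (pvMk C g).contains c = true := by
    rw [contains_pvMk]; simpa using hc
  unfold pvAClassStep
  simp only [hcont, if_true, PySem.Dict.modify, hgc]
  by_cases hw : (g c).contains w = true
  · rw [if_pos hw]
    by_cases hl : (c == l) = true
    · rw [if_pos hl, hgc, insert_pvMk_of_mem hc]
      exact pvMk_congr (fun x _ => by
        by_cases h : x = c <;> simp [h, pvStepInner, hw, hl])
    · rw [if_neg hl]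
      exact pvMk_congr (fun x _ => by
        by_cases h : x = c <;> simp [h, pvStepInner, hw, hl])
  · rw [if_neg hw, insert_pvMk_of_mem hc]
    by_cases hl : (c == l) = true
    · rw [if_pos hl, hgc, if_pos rfl, insert_pvMk_of_mem hc]
      exact pvMk_congr (fun x _ => by
        by_cases h : x = c <;> simp [h, pvStepInner, hw, hl])
    · rw [if_neg hl]
      exact pvMk_congr (fun x _ => by
        by_cases h : x = c <;> simp [h, pvStepInner, hw, hl])

-- the whole 'for c in classes' loop, classwise
theorem foldl_pvAClassStep (w l : String) (cs : List String) {C : List String} (hn : C.Nodup)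
    (hsub : ∀ c ∈ cs, c ∈ C) (g : String → PySem.Dict String Int) :
    cs.foldl (pvAClassStep w l) (pvMk C g)
      = pvMk C (fun c => if c ∈ cs then pvStepInner w l c (g c) else g c) := by
  induction cs generalizing g with
  | nil => exact (pvMk_congr (fun x _ => by simp)).symm
  | cons c cs ih =>
    simp only [List.foldl_cons]
    rw [pvAClassStep_pvMk w l hn (hsub c (by simp)) g,
      ih (fun c' hc' => hsub c' (by simp [hc'])) _]
    exact pvMk_congr (fun x _ => by
      by_cases hxc : x = c
      · subst hxc
        by_cases hx : x ∈ cs <;> simp [hx, pvStepInner_idem]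
      · by_cases hx : x ∈ cs <;> simp [hx, hxc])

theorem pvU_append (es : List (String × String)) (e : String × String) :
    pvU (es ++ [e]) = PySem.Set.add (pvU es) e.1 := by
  simp [pvU, PySem.Set.ofList, List.foldl_append]

-- pvStepInner evaluated in each of its four branches
theorem pvStepInner_tt {w l c : String} {i : PySem.Dict String Int} (hl : (c == l) = true)
    (h : i.contains w = true) : pvStepInner w l c i = i.insert w 1 := by
  unfold pvStepInner; simp [h, hl]

theorem pvStepInner_tf {w l c : String} {i : PySem.Dict String Int} (hl : (c == l) = false)
    (h : i.contains w = true) : pvStepInner w l c i = i := by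
  unfold pvStepInner; simp [h, hl]

theorem pvStepInner_ft {w l c : String} {i : PySem.Dict String Int} (hl : (c == l) = true)
    (h : i.contains w = false) : pvStepInner w l c i = (i.insert w 0).insert w 1 := by
  unfold pvStepInner; simp [h, hl]

theorem pvStepInner_ff {w l c : String} {i : PySem.Dict String Int} (hl : (c == l) = false)
    (h : i.contains w = false) : pvStepInner w l c i = i.insert w 0 := by
  unfold pvStepInner; simp [h, hl]

-- the class-c inner dict tracks pvInd through one event
theorem pvStepInner_target (w l c : String) (es : List (String × String)) :
    pvStepInner w l c (pvMk (pvU es) (pvInd es c))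
      = pvMk (pvU (es ++ [(w, l)])) (pvInd (es ++ [(w, l)]) c) := by
  rw [pvU_append]
  by_cases hw : w ∈ pvU es
  · have hcw : (pvMk (pvU es) (pvInd es c)).contains w = true := by
      rw [contains_pvMk]; simpa using hw
    rw [PySem.Set.add_of_mem hw]
    by_cases hl : (c == l) = true
    · have hcl : l = c := ((by simpa using hl : c = l)).symm
      rw [pvStepInner_tt hl hcw, insert_pvMk_of_mem hw]
      refine pvMk_congr (fun x _ => ?_)
      by_cases h : x = w
      · simp [h, pvInd, hcl]
      · have hxw : ¬ w = x := fun hh => h hh.symm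
        simp [h, hxw, pvInd]
    · have hl' : (c == l) = false := by simpa using hl
      have hlc : l ≠ c := fun hh => hl (by simp [hh])
      rw [pvStepInner_tf hl' hcw]
      exact pvMk_congr (fun x _ => by simp [pvInd, hlc])
  · have hcw : (pvMk (pvU es) (pvInd es c)).contains w = false := by
      rw [contains_pvMk]; simpa using hw
    have hwm : ∀ y, (w, y) ∉ es := fun y hy =>
      hw ((PySem.Set.mem_ofList _ _).mpr (List.mem_map.mpr ⟨(w, y), hy, rfl⟩))
    rw [PySem.Set.add_of_not_mem hw]
    by_cases hl : (c == l) = true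
    · have hcl : l = c := ((by simpa using hl : c = l)).symm
      rw [pvStepInner_ft hl hcw, insert_pvMk_of_not_mem hw,
        insert_pvMk_of_mem (by simp : w ∈ pvU es ++ [w])]
      refine pvMk_congr (fun x _ => ?_)
      by_cases h : x = w
      · simp [h, pvInd, hcl]
      · have hxw : ¬ w = x := fun hh => h hh.symm
        simp [h, hxw, pvInd]
    · have hl' : (c == l) = false := by simpa using hl
      have hlc : l ≠ c := fun hh => hl (by simp [hh])
      rw [pvStepInner_ff hl' hcw, insert_pvMk_of_not_mem hw]
      refine pvMk_congr (fun x _ => ?_)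
      by_cases h : x = w
      · simp [h, pvInd, hwm, hlc]
      · have hxw : ¬ w = x := fun hh => h hh.symm
        simp [h, hxw, pvInd]

-- A's lexicon after a stream of events, classwise
theorem pvA_loop (classes : List String) (es : List (String × String)) :
    es.foldl (fun lex e => classes.foldl (pvAClassStep e.1 e.2) lex)
        (pvMk (PySem.Set.ofList classes) (fun _ => PySem.Dict.mk []))
      = pvMk (PySem.Set.ofList classes) (fun c => pvMk (pvU es) (pvInd es c)) := by
  induction es using List.reverseRecOn with
  | nil => exact pvMk_congr (fun x _ => rfl)
  | append_singleton es e ih =>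
    rw [List.foldl_append, List.foldl_cons, List.foldl_nil, ih,
      foldl_pvAClassStep e.1 e.2 classes (PySem.Set.nodup_ofList classes)
        (fun c hc => (PySem.Set.mem_ofList classes c).mpr hc) _]
    exact pvMk_congr (fun c hc => by
      rw [if_pos ((PySem.Set.mem_ofList classes c).mp hc), pvStepInner_target])

theorem pvLab_append (es : List (String × String)) (e : String × String) (w : String) :
    pvLab (es ++ [e]) w
      = if e.1 = w then (pvLab es w).add e.2 else pvLab es w := by
  unfold pvLab
  by_cases h : e.1 = w <;>
    simp [h, List.filter_append, PySem.Set.ofList, List.foldl_append]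

-- B's inverted index after a stream of events
theorem pvB_index (es : List (String × String)) :
    es.foldl (fun idx e => idx.modify e.1 PySem.Set.empty (fun s => s.add e.2)) (PySem.Dict.mk [])
      = pvMk (pvU es) (pvLab es) := by
  induction es using List.reverseRecOn with
  | nil => rfl
  | append_singleton es e ih =>
    rw [List.foldl_append, List.foldl_cons, List.foldl_nil, ih, PySem.Dict.modify]
    by_cases hw : e.1 ∈ pvU es
    · rw [getD_pvMk (by exact PySem.Set.nodup_ofList _) hw, insert_pvMk_of_mem hw,
        pvU_append, PySem.Set.add_of_mem hw]
      exact pvMk_congr (fun x _ => by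
        rw [pvLab_append]
        by_cases h : x = e.1 <;> simp [h, eq_comm])
    · rw [getD_pvMk_of_not_mem hw, insert_pvMk_of_not_mem hw,
        pvU_append, PySem.Set.add_of_not_mem hw]
      have hfil : es.filter (fun e' => e'.1 == e.1) = [] := by
        rw [List.filter_eq_nil_iff]
        intro a ha
        have : a.1 ≠ e.1 := fun h =>
          hw ((PySem.Set.mem_ofList _ _).mpr (List.mem_map.mpr ⟨a, ha, h⟩))
        simp [this]
      exact pvMk_congr (fun x _ => by
        rw [pvLab_append]
        by_cases h : x = e.1
        · simp [h, pvLab, hfil, PySem.Set.empty]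
        · have hex : e.1 ≠ x := fun hh => h hh.symm
          simp [h, hex])

theorem pvLab_contains (es : List (String × String)) (w c : String) :
    (pvLab es w).contains c = es.any (fun e => e.1 == w && e.2 == c) := by
  rw [Bool.eq_iff_iff]
  simp only [PySem.Set.contains, List.contains_eq_mem, decide_eq_true_eq]
  unfold pvLab
  rw [PySem.Set.mem_ofList]
  simp only [List.mem_map, List.mem_filter, List.any_eq_true]
  constructor
  · rintro ⟨e, ⟨he, h1⟩, h2⟩; exact ⟨e, he, by simp_all⟩
  · rintro ⟨e, he, h⟩
    simp only [Bool.and_eq_true, beq_iff_eq] at h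
    exact ⟨e, ⟨he, by simp [h.1]⟩, h.2⟩

-- B's per-class dict comprehension over the index items
theorem pvB_inner (es : List (String × String)) (c : String) :
    (pvMk (pvU es) (pvLab es)).items.foldl (fun inner p =>
        inner.insert p.1 (if p.2.contains c then (1 : Int) else 0)) (PySem.Dict.mk [])
      = pvMk (pvU es) (pvInd es c) := by
  apply PySem.Dict.ext
  unfold pvMk
  rw [List.foldl_map]
  rw [PySem.Dict.items_foldl_insert_fresh (pvU es) (fun w => w)
      (fun w => if (pvLab es w).contains c then (1 : Int) else 0) (PySem.Dict.mk [])
      (fun a _ => by simp [PySem.Dict.contains_mk])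
      (by simp only [List.map_id']
          unfold pvU
          exact PySem.Set.nodup_ofList _)]
  simp only [List.nil_append]
  exact List.map_congr_left (fun w _ => by rw [pvLab_contains]; rfl)

-- ===== VERDICT (by name: the statement is the Claim_ definition above) =====
theorem build_dictionary_lexicon_spec : Claim_equal_build_dictionary_lexicon := by
  intro texts labels classes _
  unfold Spec_build_dictionary_lexicon build_dictionary_lexicon build_dictionary_lexicon_alt
  simp only
  -- rewrite both nested zip/words folds as folds over the event stream pvEvents
  have hA : (texts.zip labels).foldl (fun lex tl =>
        (PySem.Set.ofList (PySem.Str.split₀ tl.1)).foldl (fun lex w =>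
          classes.foldl (pvAClassStep w tl.2) lex) lex)
        (classes.foldl (fun d c => d.insert c (PySem.Dict.mk [])) (PySem.Dict.mk []))
      = (pvEvents texts labels).foldl (fun lex e => classes.foldl (pvAClassStep e.1 e.2) lex)
        (classes.foldl (fun d c => d.insert c (PySem.Dict.mk [])) (PySem.Dict.mk [])) := by
    rw [pvEvents, List.foldl_flatMap]
    congr 1
    funext lex tl
    rw [List.foldl_map]
  have hB : (texts.zip labels).foldl (fun idx tl =>
        (PySem.Set.ofList (PySem.Str.split₀ tl.1)).foldl (fun idx w =>
          idx.modify w PySem.Set.empty (fun s => s.add tl.2)) idx) (PySem.Dict.mk [])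
      = (pvEvents texts labels).foldl
          (fun idx e => idx.modify e.1 PySem.Set.empty (fun s => s.add e.2)) (PySem.Dict.mk []) := by
    rw [pvEvents, List.foldl_flatMap]
    congr 1
    funext idx tl
    rw [List.foldl_map]
  rw [hA, hB]
  set es := pvEvents texts labels with hes
  -- A's lexicon
  have hinit : (classes.foldl
        (fun (d : PySem.Dict String (PySem.Dict String Int)) c => d.insert c (PySem.Dict.mk []))
        (PySem.Dict.mk []))
      = pvMk (PySem.Set.ofList classes) (fun _ => PySem.Dict.mk ([] : List (String × Int))) := by
    have := foldl_insert_pvMk (V := PySem.Dict String Int) classes []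
      (fun _ => PySem.Dict.mk [])
    simpa [PySem.Set.update, PySem.Set.ofList, PySem.Set.empty, pvMk] using this
  rw [hinit, pvA_loop, pvB_index]
  -- B's lexicon
  have hBout : classes.foldl (fun d c =>
        d.insert c ((pvMk (pvU es) (pvLab es)).items.foldl (fun inner p =>
          inner.insert p.1 (if p.2.contains c then (1 : Int) else 0)) (PySem.Dict.mk [])))
        (PySem.Dict.mk [])
      = pvMk (PySem.Set.ofList classes) (fun c =>
          (pvMk (pvU es) (pvLab es)).items.foldl (fun inner p =>
            inner.insert p.1 (if p.2.contains c then (1 : Int) else 0)) (PySem.Dict.mk [])) := by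
    have := foldl_insert_pvMk (V := PySem.Dict String Int) classes []
      (fun c => (pvMk (pvU es) (pvLab es)).items.foldl (fun inner p =>
        inner.insert p.1 (if p.2.contains c then (1 : Int) else 0)) (PySem.Dict.mk []))
    simpa [PySem.Set.update, PySem.Set.ofList, PySem.Set.empty, pvMk] using this
  rw [hBout, pvMk_congr (fun c _ => pvB_inner es c)]
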